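-- pv_equiv track=rewrite | github.com/francescobaldi86/OptiENEA | lib/Functions/parametricAnalysis.py | nestedIterations
-- ===== SOURCE A (Python) =====
-- def nestedIterations(dict_of_values, sim_name, data={}, values=[], names=[], counter=0):
--     if len(dict_of_values) > 0:
--         item_to_remove = list(dict_of_values.keys())[0]
--         names = names + [item_to_remove]
--         for value in dict_of_values[item_to_remove]:
--             data, counter = nestedIterations({k: v for k, v in dict_of_values.items() if k != item_to_remove}, sim_name,
--                                              data, values + [value], names, counter)
--     else:
--         counter += 1
--         data.update({sim_name + str(counter): values})
--     return data, counter
-- ===== SOURCE B (Python) =====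
-- def nestedIterations(dict_of_values, sim_name, data={}, values=[], names=[], counter=0):
--     combos = [[]]
--     for vs in dict_of_values.values():
--         combos = [c + [v] for c in combos for v in vs]
--     for c in combos:
--         counter += 1
--         data[sim_name + str(counter)] = values + c
--     return data, counter
-- ===== Notes on version B (the rewrite author's own statement) =====
-- stated objective: simpler
-- what changed: Replaces A's recursive enumeration (rebuild the dict minus its first key at every level) by an iterative build of the full cartesian-product combination list followed by a single insertion loop; `data` (including its shared mutable default) is still mutated in place.
import Mathlib
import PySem

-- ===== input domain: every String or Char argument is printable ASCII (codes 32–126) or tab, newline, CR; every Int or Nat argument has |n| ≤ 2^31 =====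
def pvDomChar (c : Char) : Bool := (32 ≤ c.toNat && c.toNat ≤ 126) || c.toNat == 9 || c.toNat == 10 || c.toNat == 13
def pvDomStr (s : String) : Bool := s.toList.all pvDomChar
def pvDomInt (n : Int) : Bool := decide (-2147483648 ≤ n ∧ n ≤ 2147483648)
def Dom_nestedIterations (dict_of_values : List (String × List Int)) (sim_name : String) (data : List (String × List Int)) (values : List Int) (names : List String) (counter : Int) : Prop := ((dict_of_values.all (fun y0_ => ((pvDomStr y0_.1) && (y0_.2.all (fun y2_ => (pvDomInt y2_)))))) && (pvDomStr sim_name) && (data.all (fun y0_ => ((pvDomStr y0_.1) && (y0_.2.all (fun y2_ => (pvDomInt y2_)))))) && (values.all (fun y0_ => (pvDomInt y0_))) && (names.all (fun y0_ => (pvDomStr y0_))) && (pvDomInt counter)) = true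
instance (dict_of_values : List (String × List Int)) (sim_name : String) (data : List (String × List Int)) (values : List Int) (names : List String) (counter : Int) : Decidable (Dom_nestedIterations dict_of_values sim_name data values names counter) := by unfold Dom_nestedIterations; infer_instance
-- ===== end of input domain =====

-- ===== PORT A =====
-- B replaces A's recursive dict-shrinking enumeration by iteratively building the
-- cartesian-product combination list, then one insertion pass (objective: simpler);
-- like A, the Python B mutates `data` (and its shared default) in place.
mutual
-- literal port of A: recurse on the dict minus its first key, looping over that key's values
def nestedIterations (dict_of_values : List (String × List Int)) (sim_name : String) (data : List (String × List Int)) (values : List Int) (names : List String) (counter : Int) : (List (String × List Int)) × Int :=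
  match dict_of_values with
  | [] =>
      ((PySem.Dict.insert (PySem.Dict.mk data) (sim_name ++ PySem.Int.toStr (counter + 1)) values).items, counter + 1)
  | (k, vs) :: rest =>
      pvLoopA (rest.filter (fun p => p.1 != k)) sim_name
        (PySem.Dict.getD (PySem.Dict.mk ((k, vs) :: rest)) k []) data values (names ++ [k]) counter
termination_by (dict_of_values.length, 0)
decreasing_by
  simp only [List.length_cons]
  exact Prod.Lex.left _ _ (Nat.lt_succ_of_le (List.length_filter_le _ _))

-- the `for value in dict_of_values[item_to_remove]` loop of A
def pvLoopA (d : List (String × List Int)) (sim_name : String) (vs : List Int) (data : List (String × List Int)) (values : List Int) (names : List String) (counter : Int) : (List (String × List Int)) × Int :=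
  match vs with
  | [] => (data, counter)
  | v :: vrest =>
      let r := nestedIterations d sim_name data (values ++ [v]) names counter
      pvLoopA d sim_name vrest r.1 values names r.2
termination_by (d.length, vs.length + 1)
decreasing_by
  · exact Prod.Lex.right _ (Nat.succ_pos _)
  · exact Prod.Lex.right _ (by simp only [List.length_cons]; omega)
end

-- ===== PORT B =====
-- one product-building step: extend every partial combination by every value of the next key
def pvStep (cs : List (List Int)) (vs : List Int) : List (List Int) :=
  cs.flatMap (fun c => vs.map (fun v => c ++ [v]))

def nestedIterations_alt (dict_of_values : List (String × List Int)) (sim_name : String) (data : List (String × List Int)) (values : List Int) (names : List String) (counter : Int) : (List (String × List Int)) × Int :=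
  let combos := ((PySem.Dict.mk dict_of_values).values).foldl pvStep [[]]
  combos.foldl
    (fun (st : (List (String × List Int)) × Int) c =>
      ((PySem.Dict.insert (PySem.Dict.mk st.1) (sim_name ++ PySem.Int.toStr (st.2 + 1)) (values ++ c)).items, st.2 + 1))
    (data, counter)

-- ===== PRECONDITION & SPEC =====
-- Pre_ excludes association lists with duplicate keys in dict_of_values: such a list does not
-- represent any Python dict (Python collapses duplicates before A is ever called), so neither
-- behaviour on it is A's.
def Pre_nestedIterations (dict_of_values : List (String × List Int)) (sim_name : String) (data : List (String × List Int)) (values : List Int) (names : List String) (counter : Int) : Prop :=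
  (dict_of_values.map Prod.fst).Nodup
instance (dict_of_values : List (String × List Int)) (sim_name : String) (data : List (String × List Int)) (values : List Int) (names : List String) (counter : Int) : Decidable (Pre_nestedIterations dict_of_values sim_name data values names counter) := by unfold Pre_nestedIterations; infer_instance

def pvWitness_nestedIterations : (List (String × List Int)) × String × (List (String × List Int)) × List Int × List String × Int :=
  ([("a", [1, 2]), ("b", [3])], "s", [("p", [0])], [9], ["n"], 4)
def Spec_nestedIterations (dict_of_values : List (String × List Int)) (sim_name : String) (data : List (String × List Int)) (values : List Int) (names : List String) (counter : Int) (out : (List (String × List Int)) × Int) : Prop := out = nestedIterations_alt dict_of_values sim_name data values names counter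
instance (dict_of_values : List (String × List Int)) (sim_name : String) (data : List (String × List Int)) (values : List Int) (names : List String) (counter : Int) (out : (List (String × List Int)) × Int) : Decidable (Spec_nestedIterations dict_of_values sim_name data values names counter out) := by unfold Spec_nestedIterations; infer_instance

-- ===== CLAIM (what is proved, stated in full; the proofs are below) =====
def Claim_equal_nestedIterations : Prop := ∀ (dict_of_values : List (String × List Int)) (sim_name : String) (data : List (String × List Int)) (values : List Int) (names : List String) (counter : Int), Dom_nestedIterations dict_of_values sim_name data values names counter → Pre_nestedIterations dict_of_values sim_name data values names counter → Spec_nestedIterations dict_of_values sim_name data values names counter (nestedIterations dict_of_values sim_name data values names counter)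


-- ===== LEMMAS AND PROOFS =====
-- the insertion step of B's second loop, as a named function
def pvIns (sim_name : String) (values : List Int) (st : (List (String × List Int)) × Int) (c : List Int) : (List (String × List Int)) × Int :=
  ((PySem.Dict.insert (PySem.Dict.mk st.1) (sim_name ++ PySem.Int.toStr (st.2 + 1)) (values ++ c)).items, st.2 + 1)

-- the combination list B builds, as a function of the dict's value lists
def pvCombos (ls : List (List Int)) : List (List Int) := ls.foldl pvStep [[]]

theorem pvStep_append (cs1 cs2 : List (List Int)) (vs : List Int) :
    pvStep (cs1 ++ cs2) vs = pvStep cs1 vs ++ pvStep cs2 vs := by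
  simp [pvStep]

theorem foldl_pvStep_append (l : List (List Int)) :
    ∀ cs1 cs2 : List (List Int), l.foldl pvStep (cs1 ++ cs2) = l.foldl pvStep cs1 ++ l.foldl pvStep cs2 := by
  induction l with
  | nil => intro cs1 cs2; rfl
  | cons v l ih => intro cs1 cs2; simp only [List.foldl_cons, pvStep_append, ih]

theorem pvStep_map (v : Int) (cs : List (List Int)) (vs : List Int) :
    pvStep (cs.map (fun c => v :: c)) vs = (pvStep cs vs).map (fun c => v :: c) := by
  simp [pvStep, List.flatMap_map, List.map_flatMap, List.map_map, Function.comp_def]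

theorem foldl_pvStep_map (l : List (List Int)) :
    ∀ (v : Int) (cs : List (List Int)),
      l.foldl pvStep (cs.map (fun c => v :: c)) = (l.foldl pvStep cs).map (fun c => v :: c) := by
  induction l with
  | nil => intro v cs; rfl
  | cons w l ih => intro v cs; simp only [List.foldl_cons, pvStep_map, ih]

theorem foldl_pvStep_nil (l : List (List Int)) : l.foldl pvStep [] = [] := by
  induction l with
  | nil => rfl
  | cons w l ih => simpa [pvStep] using ih

theorem pvCombos_cons (vs : List Int) (ls : List (List Int)) :
    pvCombos (vs :: ls) = vs.flatMap (fun v => (pvCombos ls).map (fun c => v :: c)) := by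
  have aux : ∀ (vs' : List Int),
      ls.foldl pvStep (vs'.map (fun v => [v]))
        = vs'.flatMap (fun v => (ls.foldl pvStep [[]]).map (fun c => v :: c)) := by
    intro vs'
    induction vs' with
    | nil => simpa using foldl_pvStep_nil ls
    | cons v vs' ih =>
        have h1 : (v :: vs').map (fun v => ([v] : List Int))
            = ([[]] : List (List Int)).map (fun c => v :: c) ++ vs'.map (fun v => [v]) := by simp
        rw [h1, foldl_pvStep_append, foldl_pvStep_map]
        simp [ih]
  have h0 : pvStep [[]] vs = vs.map (fun v => [v]) := by simp [pvStep]
  simp only [pvCombos, List.foldl_cons, h0]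
  exact aux vs

theorem pvIns_cons (sim_name : String) (values : List Int) (v : Int)
    (st : (List (String × List Int)) × Int) (c : List Int) :
    pvIns sim_name values st (v :: c) = pvIns sim_name (values ++ [v]) st c := by
  simp [pvIns]

theorem foldl_pvIns_map (sim_name : String) (values : List Int) (v : Int) (cs : List (List Int)) :
    ∀ st, (cs.map (fun c => v :: c)).foldl (pvIns sim_name values) st
      = cs.foldl (pvIns sim_name (values ++ [v])) st := by
  induction cs with
  | nil => intro st; rfl
  | cons c cs ih => intro st; simp only [List.map_cons, List.foldl_cons, pvIns_cons, ih]

theorem pvLoopA_eq (sim_name : String) (d : List (String × List Int)) (names : List String)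
    (H : ∀ data values counter, nestedIterations d sim_name data values names counter
        = (pvCombos (d.map (·.2))).foldl (pvIns sim_name values) (data, counter)) :
    ∀ (vs : List Int) (data : List (String × List Int)) (values : List Int) (counter : Int),
      pvLoopA d sim_name vs data values names counter
        = (vs.flatMap (fun v => (pvCombos (d.map (·.2))).map (fun c => v :: c))).foldl
            (pvIns sim_name values) (data, counter) := by
  intro vs
  induction vs with
  | nil => intro data values counter; simp [pvLoopA]
  | cons v vrest ih =>
      intro data values counter
      rw [pvLoopA]
      simp only [List.flatMap_cons, List.foldl_append, foldl_pvIns_map]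
      rw [← H data (values ++ [v]) counter, ih]

theorem nestedIterations_eq (sim_name : String) :
    ∀ (d : List (String × List Int)), (d.map Prod.fst).Nodup →
      ∀ (names : List String) (data : List (String × List Int)) (values : List Int) (counter : Int),
        nestedIterations d sim_name data values names counter
          = (pvCombos (d.map (·.2))).foldl (pvIns sim_name values) (data, counter) := by
  intro d
  induction d with
  | nil =>
      intro _ names data values counter
      simp [nestedIterations, pvCombos, pvIns]
  | cons p rest ih =>
      obtain ⟨k, vs⟩ := p
      intro hnd names data values counter
      simp only [List.map_cons, List.nodup_cons] at hnd
      have hfilter : rest.filter (fun p => p.1 != k) = rest := by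
        apply List.filter_eq_self.mpr
        intro p hp
        simp only [bne_iff_ne, ne_eq]
        intro h
        exact hnd.1 (h ▸ List.mem_map_of_mem hp)
      have hget : PySem.Dict.getD (PySem.Dict.mk ((k, vs) :: rest)) k [] = vs := by
        simp [PySem.Dict.getD, PySem.Dict.get?_mk_cons]
      rw [nestedIterations, hfilter, hget, List.map_cons, pvCombos_cons]
      exact pvLoopA_eq sim_name rest (names ++ [k]) (fun data values counter => ih hnd.2 (names ++ [k]) data values counter) vs data values counter

-- ===== VERDICT (by name: the statement is the Claim_ definition above) =====
theorem nestedIterations_spec : Claim_equal_nestedIterations := by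
  intro dict_of_values sim_name data values names counter _ hpre
  unfold Spec_nestedIterations nestedIterations_alt
  rw [nestedIterations_eq sim_name dict_of_values hpre names data values counter]
  rfl
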